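-- pv_equiv track=rewrite | github.com/fdev31/loganalyst | loganalyst/models.py | extractExtras
-- ===== SOURCE A (Python) =====
-- def extractExtras(startLine: str, extraLines: list[str]) -> list[str]:
--     extras = []
--     brackets = (
--         ("[", "]"),
--         ("{", "}"),
--     )
--     for oB, cB in brackets:
--         diff = startLine.count(oB) - startLine.count(cB)
--         if diff > 0:
--             for e in extraLines:
--                 diff += e.count(oB)
--                 diff -= e.count(cB)
--                 extras.append(e[:-1])
--                 if diff <= 0:
--                     break
--     return extras
-- ===== SOURCE B (Python) =====
-- def extractExtras(startLine: str, extraLines: list[str]) -> list[str]: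
--     extras = []
--     for oB, cB in (("[", "]"), ("{", "}")):
--         bal = startLine.count(oB) - startLine.count(cB)
--         if bal > 0:
--             # running balance after each extra line
--             bals = []
--             for e in extraLines:
--                 bal += e.count(oB) - e.count(cB)
--                 bals.append(bal)
--             idx = next((i for i, b in enumerate(bals) if b <= 0), len(extraLines) - 1)
--             extras.extend(e[:-1] for e in extraLines[:idx + 1])
--     return extras
-- ===== Notes on version B (the rewrite author's own statement) =====
-- stated objective: alternative
-- what changed: Replaces A's count-append-break scan per bracket pair by building the full running-balance list first, locating the first index where it drops to <= 0 (falling back to the last line), and slicing the trimmed lines out of extraLines in one go.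
import Mathlib
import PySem

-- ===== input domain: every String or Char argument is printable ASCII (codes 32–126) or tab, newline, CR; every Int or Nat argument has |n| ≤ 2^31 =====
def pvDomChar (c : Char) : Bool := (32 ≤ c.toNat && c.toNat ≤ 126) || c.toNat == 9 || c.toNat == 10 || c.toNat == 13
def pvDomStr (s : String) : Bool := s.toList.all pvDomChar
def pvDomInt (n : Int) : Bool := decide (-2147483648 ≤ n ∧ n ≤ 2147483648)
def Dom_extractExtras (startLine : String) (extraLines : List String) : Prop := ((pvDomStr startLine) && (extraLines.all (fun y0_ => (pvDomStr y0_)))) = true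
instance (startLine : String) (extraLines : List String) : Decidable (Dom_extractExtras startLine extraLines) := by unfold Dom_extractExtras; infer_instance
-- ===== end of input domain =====

-- B computes the running bracket balance over all extraLines first, locates the first index
-- where it drops to ≤ 0 and slices the answer out of extraLines in one go, instead of A's
-- count-append-break scan (objective: alternative decomposition, same cost).

-- ===== PORT A =====
-- inner 'for e in extraLines: … if diff <= 0: break' of A
def pvScanA (oB cB : String) : Int → List String → List String → List String
  | _, acc, [] => acc
  | diff, acc, e :: rest =>
    let diff := diff + (PySem.Str.count e oB : Int) - (PySem.Str.count e cB : Int)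
    let acc := acc ++ [PySem.Str.slice e none (some (-1))]
    if diff ≤ 0 then acc else pvScanA oB cB diff acc rest

def extractExtras (startLine : String) (extraLines : List String) : List String :=
  [("[", "]"), ("{", "}")].foldl (fun extras p =>
    let oB := p.1
    let cB := p.2
    let diff : Int := (PySem.Str.count startLine oB : Int) - (PySem.Str.count startLine cB : Int)
    if diff > 0 then pvScanA oB cB diff extras extraLines else extras) []

-- ===== PORT B =====
-- Source B's loop building the list of running balances (append to the list in the state)
def pvBalsB (oB cB : String) (init : Int) (lines : List String) : List Int :=
  (lines.foldl (fun (st : Int × List Int) e =>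
    let b := st.1 + (PySem.Str.count e oB : Int) - (PySem.Str.count e cB : Int)
    (b, st.2 ++ [b])) (init, [])).2

def extractExtras_alt (startLine : String) (extraLines : List String) : List String :=
  [("[", "]"), ("{", "}")].foldl (fun extras p =>
    let oB := p.1
    let cB := p.2
    let bal : Int := (PySem.Str.count startLine oB : Int) - (PySem.Str.count startLine cB : Int)
    if bal > 0 then
      let bals := pvBalsB oB cB bal extraLines
      let idx : Int := match bals.findIdx? (fun b => b ≤ 0) with
        | some i => (i : Int)
        | none => (extraLines.length : Int) - 1
      extras ++ (PySem.List.slice extraLines none (some (idx + 1))).map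
        (fun e => PySem.Str.slice e none (some (-1)))
    else extras) []

-- ===== PRECONDITION & SPEC =====
def Spec_extractExtras (startLine : String) (extraLines : List String) (out : List String) : Prop := out = extractExtras_alt startLine extraLines
instance (startLine : String) (extraLines : List String) (out : List String) : Decidable (Spec_extractExtras startLine extraLines out) := by unfold Spec_extractExtras; infer_instance

-- ===== CLAIM (what is proved, stated in full; the proofs are below) =====
def Claim_equal_extractExtras : Prop := ∀ (startLine : String) (extraLines : List String), Dom_extractExtras startLine extraLines → Spec_extractExtras startLine extraLines (extractExtras startLine extraLines)

-- ===== LEMMAS AND PROOFS =====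

-- delta of one line
def pvDelta (oB cB : String) (e : String) : Int :=
  (PySem.Str.count e oB : Int) - (PySem.Str.count e cB : Int)

-- the balances list, recursively (proof-side characterisation of pvBalsB)
def pvBalsR (oB cB : String) (init : Int) : List String → List Int
  | [] => []
  | e :: rest => (init + pvDelta oB cB e) :: pvBalsR oB cB (init + pvDelta oB cB e) rest

theorem pvBalsB_go_acc (oB cB : String) (lines : List String) (init : Int) (acc : List Int) :
    (lines.foldl (fun (st : Int × List Int) e =>
      let b := st.1 + (PySem.Str.count e oB : Int) - (PySem.Str.count e cB : Int)
      (b, st.2 ++ [b])) (init, acc)).2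
    = acc ++ pvBalsR oB cB init lines := by
  induction lines generalizing init acc with
  | nil => simp [pvBalsR]
  | cons e rest ih =>
    simp only [List.foldl_cons, pvBalsR]
    rw [show init + pvDelta oB cB e
        = init + (PySem.Str.count e oB : Int) - (PySem.Str.count e cB : Int) from by
      unfold pvDelta; ring]
    rw [ih]
    simp

theorem pvBalsB_eq (oB cB : String) (init : Int) (lines : List String) :
    pvBalsB oB cB init lines = pvBalsR oB cB init lines := by
  unfold pvBalsB
  rw [pvBalsB_go_acc]
  simp

-- the number of lines B keeps, as a Nat
def pvTakeN (oB cB : String) (init : Int) (lines : List String) : Nat :=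
  match (pvBalsR oB cB init lines).findIdx? (fun b => b ≤ 0) with
  | some i => i + 1
  | none => lines.length

theorem pvScanA_eq_take (oB cB : String) (lines : List String) (diff : Int) (acc : List String) :
    pvScanA oB cB diff acc lines
      = acc ++ (lines.take (pvTakeN oB cB diff lines)).map
          (fun e => PySem.Str.slice e none (some (-1))) := by
  induction lines generalizing diff acc with
  | nil => simp [pvScanA, pvTakeN, pvBalsR]
  | cons e rest ih =>
    simp only [pvScanA]
    rw [show diff + (PySem.Str.count e oB : Int) - (PySem.Str.count e cB : Int)
        = diff + pvDelta oB cB e from by unfold pvDelta; ring]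
    by_cases h : diff + pvDelta oB cB e ≤ 0
    · rw [if_pos h]
      have hb : (pvBalsR oB cB diff (e :: rest)).findIdx? (fun b => decide (b ≤ 0)) = some 0 := by
        simp only [pvBalsR, List.findIdx?_cons]
        simp [h]
      simp [pvTakeN, hb]
    · rw [if_neg h]
      rw [ih]
      have hT : pvTakeN oB cB diff (e :: rest)
          = pvTakeN oB cB (diff + pvDelta oB cB e) rest + 1 := by
        unfold pvTakeN
        simp only [pvBalsR, List.findIdx?_cons]
        have hfalse : (decide (diff + pvDelta oB cB e ≤ 0)) = false := by simp [h]
        simp only [hfalse, Bool.false_eq_true, if_false, List.length_cons]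
        cases hx : (pvBalsR oB cB (diff + pvDelta oB cB e) rest).findIdx? (fun b => decide (b ≤ 0)) with
        | none => simp
        | some i => simp
      rw [hT]
      simp [List.take_succ_cons]

-- B's per-pair slice equals the same take
theorem pvAltPiece_eq_take (oB cB : String) (bal : Int) (lines : List String) :
    (PySem.List.slice lines none
        (some ((match (pvBalsB oB cB bal lines).findIdx? (fun b => b ≤ 0) with
                | some i => (i : Int)
                | none => (lines.length : Int) - 1) + 1)))
      = lines.take (pvTakeN oB cB bal lines) := by
  rw [pvBalsB_eq]
  unfold pvTakeN
  cases hx : (pvBalsR oB cB bal lines).findIdx? (fun b => b ≤ 0) with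
  | some i =>
    have : ((i : Int) + 1) = ((i + 1 : Nat) : Int) := by push_cast; ring
    rw [this, PySem.List.slice_to_natCast]
  | none =>
    rcases lines with _ | ⟨l, ls⟩
    · simp [PySem.List.slice]
    · have : (((l :: ls).length : Int) - 1 + 1) = (((l :: ls).length : Nat) : Int) := by ring
      rw [this, PySem.List.slice_to_natCast]

-- ===== VERDICT (by name: the statement is the Claim_ definition above) =====
theorem extractExtras_spec : Claim_equal_extractExtras := by
  intro startLine extraLines _
  unfold Spec_extractExtras extractExtras extractExtras_alt
  simp only [List.foldl_cons, List.foldl_nil]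
  by_cases h1 : ((PySem.Str.count startLine "[" : Int) - (PySem.Str.count startLine "]" : Int)) > 0 <;>
  by_cases h2 : ((PySem.Str.count startLine "{" : Int) - (PySem.Str.count startLine "}" : Int)) > 0 <;>
  simp only [h1, h2, if_pos, if_false, pvScanA_eq_take, pvAltPiece_eq_take]
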